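-- pv_equiv track=rewrite | github.com/Inc0deus/Advent-of-code-2023 | 07/7.py | hand_possible
-- ===== SOURCE A (Python) =====
-- def hand_possible(wanted, hand, nb_jokers):
--     J = nb_jokers
--     possible = True
--     for i in range(len(wanted)):
--         if i >= len(hand):
--             if J-wanted[i] >= 0:
--                 J -= wanted[i]
--                 continue
--             else:
--                 possible = False
--                 break
--         elif hand[i] == wanted[i]: continue
--         elif hand[i]+J >= wanted[i]:
--             J -= wanted[i]-hand[i]
--         else:
--             possible = False
--             break
--
--     return possible
-- ===== SOURCE B (Python) =====
-- def hand_possible(wanted, hand, nb_jokers):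
--     n = len(wanted)
--     deficits = [wanted[i] - (hand[i] if i < len(hand) else 0) for i in range(n)]
--     return all(sum(deficits[:i + 1]) <= nb_jokers for i in range(len(deficits)))
-- ===== Notes on version B (the rewrite author's own statement) =====
-- stated objective: alternative
-- what changed: Replaces A's single stateful pass (decremented joker budget J, possible/break flags, four-way branching) by two staged passes: first materialise the list of signed deficits wanted[i]-hand[i] (0-padded), then check with all() that every prefix re-summed from scratch stays within nb_jokers; no running budget or accumulator state.
-- outside the precondition, e.g. on hand_possible([5], [5], -1): A returns True, B returns False
import Mathlib
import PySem

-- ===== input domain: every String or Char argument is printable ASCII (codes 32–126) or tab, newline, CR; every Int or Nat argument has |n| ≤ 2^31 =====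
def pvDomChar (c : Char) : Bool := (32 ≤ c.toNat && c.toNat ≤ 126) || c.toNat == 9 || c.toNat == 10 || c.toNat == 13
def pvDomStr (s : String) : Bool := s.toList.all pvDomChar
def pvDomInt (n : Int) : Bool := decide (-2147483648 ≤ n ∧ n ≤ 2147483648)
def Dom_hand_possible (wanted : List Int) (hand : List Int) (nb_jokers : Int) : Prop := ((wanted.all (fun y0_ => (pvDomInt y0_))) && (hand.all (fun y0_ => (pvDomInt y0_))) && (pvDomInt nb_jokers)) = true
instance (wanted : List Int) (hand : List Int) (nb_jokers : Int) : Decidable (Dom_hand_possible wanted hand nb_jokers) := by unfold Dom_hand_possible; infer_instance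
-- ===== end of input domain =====

-- B replaces A's stateful budget loop by two staged passes: build the signed deficit list,
-- then check every prefix sum (re-summed from scratch) against nb_jokers (objective: alternative).

-- ===== PORT A =====
-- A's for-loop over range(len(wanted)) with state J and early break; i advances over wanted
-- while hand[i] tracks it, rendered as lockstep structural recursion over the two suffixes.
def hand_possible_loopA (wanted : List Int) (hand : List Int) (J : Int) : Bool :=
  match wanted, hand with
  | [], _ => true
  | w :: ws, [] =>                            -- i >= len(hand)
      if J - w ≥ 0 then hand_possible_loopA ws [] (J - w) else false
  | w :: ws, h :: hs =>
      if h = w then hand_possible_loopA ws hs J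
      else if h + J ≥ w then hand_possible_loopA ws hs (J - (w - h))
      else false

def hand_possible (wanted : List Int) (hand : List Int) (nb_jokers : Int) : Bool :=
  hand_possible_loopA wanted hand nb_jokers

-- ===== PORT B =====
-- Source B: deficits = [wanted[i] - (hand[i] if i < len(hand) else 0) for i in range(n)];
-- return all(sum(deficits[:i+1]) <= nb_jokers for i in range(len(deficits))).
-- Indices i drawn from range(len(·)) are always in range, so getD is exact here.
def hand_possible_alt (wanted : List Int) (hand : List Int) (nb_jokers : Int) : Bool :=
  let deficits := (List.range wanted.length).map
    (fun i => wanted.getD i 0 - (if i < hand.length then hand.getD i 0 else 0))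
  (List.range deficits.length).all (fun i => decide ((deficits.take (i + 1)).sum ≤ nb_jokers))

-- ===== PRECONDITION & SPEC =====
-- Pre_ restricts to the natural domain of a non-negative joker count: for negative nb_jokers
-- A skips positions where hand matches wanted without ever checking the (already negative)
-- budget, while B checks every prefix sum; matching A there would be mirroring an accident.
def Pre_hand_possible (wanted : List Int) (hand : List Int) (nb_jokers : Int) : Prop :=
  0 ≤ nb_jokers
instance (wanted : List Int) (hand : List Int) (nb_jokers : Int) : Decidable (Pre_hand_possible wanted hand nb_jokers) := by unfold Pre_hand_possible; infer_instance

def pvWitness_hand_possible : List Int × List Int × Int := ([3, 1, 2], [2, 1], 4)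

def Spec_hand_possible (wanted : List Int) (hand : List Int) (nb_jokers : Int) (out : Bool) : Prop := out = hand_possible_alt wanted hand nb_jokers
instance (wanted : List Int) (hand : List Int) (nb_jokers : Int) (out : Bool) : Decidable (Spec_hand_possible wanted hand nb_jokers out) := by unfold Spec_hand_possible; infer_instance

-- ===== CLAIM (what is proved, stated in full; the proofs are below) =====
def Claim_equal_hand_possible : Prop := ∀ (wanted : List Int) (hand : List Int) (nb_jokers : Int), Dom_hand_possible wanted hand nb_jokers → Pre_hand_possible wanted hand nb_jokers → Spec_hand_possible wanted hand nb_jokers (hand_possible wanted hand nb_jokers)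

-- ===== LEMMAS AND PROOFS =====

-- The deficit list: wanted[i] - hand[i], with hand 0-padded to wanted's length.
def defList : List Int → List Int → List Int
  | [], _ => []
  | w :: ws, [] => w :: defList ws []
  | w :: ws, h :: hs => (w - h) :: defList ws hs

-- All prefix sums of ds stay ≤ J, expressed with a running budget.
def allPrefix : List Int → Int → Bool
  | [], _ => true
  | d :: ds, J => (decide (d ≤ J)) && allPrefix ds (J - d)

theorem loopA_eq_allPrefix :
    ∀ (wanted hand : List Int) (J : Int), 0 ≤ J →
      hand_possible_loopA wanted hand J = allPrefix (defList wanted hand) J := by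
  intro wanted
  induction wanted with
  | nil => intro hand J _; cases hand <;> rfl
  | cons w ws ih =>
      intro hand J hJ
      cases hand with
      | nil =>
          rw [hand_possible_loopA, defList, allPrefix]
          by_cases hc : J - w ≥ 0
          · rw [if_pos hc, ih [] (J - w) (by omega), decide_eq_true (by omega : w ≤ J),
              Bool.true_and]
          · rw [if_neg hc, decide_eq_false (by omega : ¬ w ≤ J), Bool.false_and]
      | cons h hs =>
          rw [hand_possible_loopA, defList, allPrefix]
          by_cases he : h = w
          · subst he
            rw [if_pos rfl, decide_eq_true (by omega : h - h ≤ J), Bool.true_and,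
              show J - (h - h) = J by omega]
            exact ih hs J hJ
          · rw [if_neg he]
            by_cases hc : h + J ≥ w
            · rw [if_pos hc, decide_eq_true (by omega : w - h ≤ J), Bool.true_and,
                ih hs (J - (w - h)) (by omega)]
            · rw [if_neg hc, decide_eq_false (by omega : ¬ w - h ≤ J), Bool.false_and]

theorem deficits_eq_defList :
    ∀ (wanted hand : List Int),
      (List.range wanted.length).map
        (fun i => wanted.getD i 0 - (if i < hand.length then hand.getD i 0 else 0))
      = defList wanted hand := by
  intro wanted
  induction wanted with
  | nil => intro hand; rfl
  | cons w ws ih =>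
      intro hand
      cases hand with
      | nil =>
          rw [defList]
          simp only [List.length_cons, List.length_nil]
          rw [List.range_succ_eq_map, List.map_cons, List.map_map]
          simp only [List.getD_cons_zero]
          rw [if_neg (by omega), ← ih []]
          simp [Function.comp_def]
      | cons h hs =>
          rw [defList]
          simp only [List.length_cons]
          rw [List.range_succ_eq_map, List.map_cons, List.map_map]
          simp only [List.getD_cons_zero]
          rw [if_pos (by omega), ← ih hs]
          simp only [Function.comp_def, List.getD_cons_succ, Nat.succ_lt_succ_iff]

theorem allPrefix_eq_all_take :
    ∀ (ds : List Int) (J : Int),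
      allPrefix ds J
      = (List.range ds.length).all (fun i => decide ((ds.take (i + 1)).sum ≤ J)) := by
  intro ds
  induction ds with
  | nil => intro J; rfl
  | cons d t ih =>
      intro J
      rw [allPrefix, List.length_cons, List.range_succ_eq_map, List.all_cons, List.all_map]
      simp only [List.take_succ_cons, List.sum_cons, List.take_zero, List.sum_nil, add_zero,
        Function.comp_def]
      rw [ih (J - d)]
      congr 1
      congr 1
      funext i
      simp only [Nat.succ_eq_add_one]
      rw [decide_eq_decide]
      omega

-- ===== VERDICT (by name: the statement is the Claim_ definition above) =====
theorem hand_possible_spec : Claim_equal_hand_possible := by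
  intro wanted hand nb _ hpre
  unfold Spec_hand_possible hand_possible hand_possible_alt
  rw [deficits_eq_defList, loopA_eq_allPrefix wanted hand nb hpre, allPrefix_eq_all_take]
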